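-- pv_equiv track=rewrite | github.com/Joefear/dgce-engine | aether_core/router/planner.py | _is_string_only_collection
-- ===== SOURCE A (Python) =====
-- def _is_string_only_collection(text: str) -> bool:
--     """Return True when a brace body is a comma-separated collection of JSON strings only."""
--     index = 0
--     length = len(text)
--     saw_string = False
--
--     while index < length:
--         while index < length and text[index] in " \t\r\n,":
--             index += 1
--         if index >= length:
--             break
--         if text[index] != '"':
--             return False
--         saw_string = True
--         index += 1
--         escape_next = False
--         while index < length:
--             char = text[index]
--             if escape_next:
--                 escape_next = False
--                 index += 1
--                 continue
--             if char == "\\":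
--                 escape_next = True
--                 index += 1
--                 continue
--             if char == '"':
--                 index += 1
--                 break
--             index += 1
--         else:
--             return False
--
--         while index < length and text[index] in " \t\r\n":
--             index += 1
--         if index < length and text[index] not in ",":
--             return False
--
--     return saw_string
-- ===== SOURCE B (Python) =====
-- def _is_string_only_collection(text: str) -> bool:
--     """Single-pass state machine instead of nested while-loops."""
--     EXPECT_VALUE, IN_STRING, IN_ESCAPE, AFTER_VALUE = range(4)
--     state = EXPECT_VALUE
--     saw_string = False
--     for ch in text:
--         if state == EXPECT_VALUE:
--             if ch in " \t\r\n,":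
--                 continue
--             if ch == '"':
--                 state = IN_STRING
--                 saw_string = True
--             else:
--                 return False
--         elif state == IN_STRING:
--             if ch == "\\":
--                 state = IN_ESCAPE
--             elif ch == '"':
--                 state = AFTER_VALUE
--         elif state == IN_ESCAPE:
--             state = IN_STRING
--         else:  # AFTER_VALUE
--             if ch in " \t\r\n":
--                 continue
--             if ch == ",":
--                 state = EXPECT_VALUE
--             else:
--                 return False
--     if state in (IN_STRING, IN_ESCAPE):
--         return False
--     return saw_string
-- ===== Notes on version B (the rewrite author's own statement) =====
-- stated objective: alternative
-- what changed: Replaced A's nested while-loops (outer loop with three inner index-advancing scans and a while/else) by a single flat pass driven by an explicit four-state machine (EXPECT_VALUE/IN_STRING/IN_ESCAPE/AFTER_VALUE) with a saw_string flag.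
import Mathlib
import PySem

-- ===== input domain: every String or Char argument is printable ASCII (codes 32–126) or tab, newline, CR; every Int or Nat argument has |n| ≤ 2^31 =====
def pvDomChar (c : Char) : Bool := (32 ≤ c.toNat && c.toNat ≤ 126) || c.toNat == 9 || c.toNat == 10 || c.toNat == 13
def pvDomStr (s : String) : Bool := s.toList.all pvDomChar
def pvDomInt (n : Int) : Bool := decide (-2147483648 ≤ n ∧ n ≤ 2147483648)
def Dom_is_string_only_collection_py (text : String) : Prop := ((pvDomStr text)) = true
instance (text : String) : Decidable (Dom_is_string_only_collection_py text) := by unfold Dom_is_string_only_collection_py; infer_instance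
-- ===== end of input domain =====

-- B replaces A's nested while-loops with a single flat state machine over the characters
-- (objective: alternative decomposition, same O(n) cost); return values agree on all inputs.

-- ===== PORT A =====
-- char classes used by A's membership tests `in " \t\r\n,"` and `in " \t\r\n"`
def pvIsSep (c : Char) : Bool := c = ' ' || c = '\t' || c = '\r' || c = '\n' || c = ','
def pvIsWs (c : Char) : Bool := c = ' ' || c = '\t' || c = '\r' || c = '\n'

-- A's inner string-scanning while-loop: `none` = loop ran off the end (the while/else
-- `return False`), `some rest` = closing quote consumed, `rest` is the remaining text.
def pvScanA : Bool → List Char → Option (List Char)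
  | _, [] => none
  | true, _ :: rest => pvScanA false rest
  | false, c :: rest =>
      if c = '\\' then pvScanA true rest
      else if c = '"' then some rest
      else pvScanA false rest

lemma pvScanA_length : ∀ (esc : Bool) (cs rest : List Char),
    pvScanA esc cs = some rest → rest.length < cs.length := by
  intro esc cs
  induction cs generalizing esc with
  | nil => intro rest h; simp [pvScanA] at h
  | cons c cs ih =>
    intro rest h
    cases esc with
    | true =>
      have := ih false rest (by simpa [pvScanA] using h)
      simp; omega
    | false =>
      by_cases hb : c = '\\'
      · have := ih true rest (by simpa [pvScanA, hb] using h)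
        simp; omega
      · by_cases hq : c = '"'
        · simp [pvScanA, hq] at h; simp [← h]
        · have := ih false rest (by simpa [pvScanA, hb, hq] using h)
          simp; omega

-- A's outer while-loop (index advances ⇒ suffix recursion).
def pvOuterA (cs : List Char) (saw : Bool) : Bool :=
  match _h1 : cs.dropWhile pvIsSep with
  | [] => saw
  | c :: rest =>
    if c ≠ '"' then false
    else
      match _h2 : pvScanA false rest with
      | none => false
      | some rest2 =>
        match _h3 : rest2.dropWhile pvIsWs with
        | [] => true
        | d :: rest3 =>
          if d ≠ ',' then false
          else pvOuterA (d :: rest3) true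
termination_by cs.length
decreasing_by
  have l1 : (c :: rest).length ≤ cs.length := by
    have := (List.dropWhile_sublist (p := pvIsSep) (l := cs)).length_le
    rw [_h1] at this; exact this
  have l2 := pvScanA_length false rest rest2 _h2
  have l3 : (d :: rest3).length ≤ rest2.length := by
    have := (List.dropWhile_sublist (p := pvIsWs) (l := rest2)).length_le
    rw [_h3] at this; exact this
  simp at l1 l3 ⊢; omega

def is_string_only_collection_py (text : String) : Bool := pvOuterA text.toList false

-- ===== PORT B =====
inductive PvState | expectValue | inString | inEscape | afterValue
deriving DecidableEq, Repr

-- B's single pass: state machine over the characters, saw flag threaded through.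
def pvRunB : PvState → Bool → List Char → Bool
  | .inString, _, [] => false
  | .inEscape, _, [] => false
  | .expectValue, saw, [] => saw
  | .afterValue, saw, [] => saw
  | .expectValue, saw, c :: rest =>
      if pvIsSep c then pvRunB .expectValue saw rest
      else if c = '"' then pvRunB .inString true rest
      else false
  | .inString, saw, c :: rest =>
      if c = '\\' then pvRunB .inEscape saw rest
      else if c = '"' then pvRunB .afterValue saw rest
      else pvRunB .inString saw rest
  | .inEscape, saw, _ :: rest => pvRunB .inString saw rest
  | .afterValue, saw, c :: rest =>
      if pvIsWs c then pvRunB .afterValue saw rest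
      else if c = ',' then pvRunB .expectValue saw rest
      else false

def is_string_only_collection_py_alt (text : String) : Bool :=
  pvRunB .expectValue false text.toList

-- ===== PRECONDITION & SPEC =====
def Spec_is_string_only_collection_py (text : String) (out : Bool) : Prop := out = is_string_only_collection_py_alt text
instance (text : String) (out : Bool) : Decidable (Spec_is_string_only_collection_py text out) := by unfold Spec_is_string_only_collection_py; infer_instance

-- ===== CLAIM (what is proved, stated in full; the proofs are below) =====
def Claim_equal_is_string_only_collection_py : Prop := ∀ (text : String), Dom_is_string_only_collection_py text → Spec_is_string_only_collection_py text (is_string_only_collection_py text)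

-- ===== LEMMAS AND PROOFS =====
-- B skips separator chars in state expectValue, matching A's first inner skip loop.
lemma pvRunB_expect_dropWhile : ∀ (cs : List Char) (saw : Bool),
    pvRunB .expectValue saw cs = pvRunB .expectValue saw (cs.dropWhile pvIsSep) := by
  intro cs
  induction cs with
  | nil => intro saw; rfl
  | cons c rest ih =>
    intro saw
    by_cases h : pvIsSep c = true
    · simp [pvRunB, h, ih]
    · simp [h]

-- B skips whitespace in state afterValue, matching A's post-string skip loop.
lemma pvRunB_after_dropWhile : ∀ (cs : List Char) (saw : Bool),
    pvRunB .afterValue saw cs = pvRunB .afterValue saw (cs.dropWhile pvIsWs) := by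
  intro cs
  induction cs with
  | nil => intro saw; rfl
  | cons c rest ih =>
    intro saw
    by_cases h : pvIsWs c = true
    · simp [pvRunB, h, ih]
    · simp [h]

-- B in the string states computes exactly A's inner string loop.
lemma pvRunB_string_scan : ∀ (cs : List Char) (esc saw : Bool),
    pvRunB (if esc then .inEscape else .inString) saw cs =
      (match pvScanA esc cs with
       | none => false
       | some rest => pvRunB .afterValue saw rest) := by
  intro cs
  induction cs with
  | nil => intro esc saw; cases esc <;> rfl
  | cons c rest ih =>
    intro esc saw
    cases esc with
    | true =>
      have := ih false saw
      simpa [pvRunB, pvScanA] using this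
    | false =>
      by_cases hb : c = '\\'
      · have := ih true saw
        simpa [pvRunB, pvScanA, hb] using this
      · by_cases hq : c = '"'
        · simp [pvRunB, pvScanA, hq]
        · have := ih false saw
          simpa [pvRunB, pvScanA, hb, hq] using this

lemma pvOuterA_eq_runB : ∀ (n : Nat) (cs : List Char) (saw : Bool), cs.length ≤ n →
    pvOuterA cs saw = pvRunB .expectValue saw cs := by
  intro n
  induction n with
  | zero =>
    intro cs saw h
    have : cs = [] := by cases cs <;> simp_all
    subst this; rw [pvOuterA]; rfl
  | succ n ih =>
    intro cs saw hlen
    rw [pvOuterA, pvRunB_expect_dropWhile]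
    cases h1 : cs.dropWhile pvIsSep with
    | nil => rfl
    | cons c rest =>
      have hc : pvIsSep c = false := by
        have := List.head?_dropWhile_not pvIsSep cs
        rw [h1] at this; simpa using this
      by_cases hq : c = '"'
      · subst hq
        simp only [pvRunB, hc, reduceIte]
        have hscan := pvRunB_string_scan rest false true
        simp only [if_neg Bool.false_ne_true] at hscan
        rw [hscan]
        cases h2 : pvScanA false rest with
        | none => simp
        | some rest2 =>
          simp only
          rw [pvRunB_after_dropWhile]
          cases h3 : rest2.dropWhile pvIsWs with
          | nil => rfl
          | cons d rest3 =>
            have hd : pvIsWs d = false := by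
              have := List.head?_dropWhile_not pvIsWs rest2
              rw [h3] at this; simpa using this
            by_cases hcomma : d = ','
            · subst hcomma
              simp only [pvRunB, hd, reduceIte, Bool.false_eq_true]
              -- A loops back on (',' :: rest3); B is already past the comma
              have hlt : (',' :: rest3).length ≤ n := by
                have l1 : ('"' :: rest).length ≤ cs.length := by
                  have := (List.dropWhile_sublist (p := pvIsSep) (l := cs)).length_le
                  rw [h1] at this; exact this
                have l2 := pvScanA_length false rest rest2 h2
                have l3 : (',' :: rest3).length ≤ rest2.length := by
                  have := (List.dropWhile_sublist (p := pvIsWs) (l := rest2)).length_le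
                  rw [h3] at this; exact this
                simp at l1 l3 ⊢; omega
              have := ih (',' :: rest3) true hlt
              rw [this]
              -- unfold B one step on the comma
              have : pvIsSep ',' = true := by decide
              simp [pvRunB, this]
            · simp [pvRunB, hd, hcomma]
      · simp [pvRunB, hc, hq]

-- ===== VERDICT (by name: the statement is the Claim_ definition above) =====
theorem is_string_only_collection_py_spec : Claim_equal_is_string_only_collection_py := by
  intro text _
  unfold Spec_is_string_only_collection_py is_string_only_collection_py is_string_only_collection_py_alt
  exact pvOuterA_eq_runB text.toList.length text.toList false (le_refl _)
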